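-- pv_equiv track=rewrite | github.com/widegroundkitnip/file-organizer | planner/learner.py | _size_bucket
-- ===== SOURCE A (Python) =====
-- def _size_bucket(size_bytes: int) -> str:
--     """Bucket file size into a readable range."""
--     for lo, hi, label in [
--         (0,       1024*1024,          "lt_1mb"),
--         (1024*1024, 10*1024*1024,     "1mb_10mb"),
--         (10*1024*1024, 100*1024*1024, "10mb_100mb"),
--         (100*1024*1024, float("inf"), "gt_100mb"),
--     ]:
--         if lo <= size_bytes < hi:
--             return label
--     return "lt_1mb"
-- ===== SOURCE B (Python) =====
-- _THRESHOLDS = [1024*1024, 10*1024*1024, 100*1024*1024]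
-- _LABELS = ["lt_1mb", "1mb_10mb", "10mb_100mb", "gt_100mb"]
--
-- def _size_bucket(size_bytes: int) -> str:
--     """Bucket file size into a readable range (binary search over sorted thresholds)."""
--     lo, hi = 0, len(_THRESHOLDS)
--     while lo < hi:
--         mid = (lo + hi) // 2
--         if _THRESHOLDS[mid] <= size_bytes:
--             lo = mid + 1
--         else:
--             hi = mid
--     return _LABELS[lo]
-- ===== Notes on version B (the rewrite author's own statement) =====
-- stated objective: idiomatic
-- what changed: Replaced the linear first-match scan over (lo,hi,label) ranges (with an inf sentinel and a fallback return) by a bisect-right binary search into an ascending thresholds table indexing a parallel labels list.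
import Mathlib
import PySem

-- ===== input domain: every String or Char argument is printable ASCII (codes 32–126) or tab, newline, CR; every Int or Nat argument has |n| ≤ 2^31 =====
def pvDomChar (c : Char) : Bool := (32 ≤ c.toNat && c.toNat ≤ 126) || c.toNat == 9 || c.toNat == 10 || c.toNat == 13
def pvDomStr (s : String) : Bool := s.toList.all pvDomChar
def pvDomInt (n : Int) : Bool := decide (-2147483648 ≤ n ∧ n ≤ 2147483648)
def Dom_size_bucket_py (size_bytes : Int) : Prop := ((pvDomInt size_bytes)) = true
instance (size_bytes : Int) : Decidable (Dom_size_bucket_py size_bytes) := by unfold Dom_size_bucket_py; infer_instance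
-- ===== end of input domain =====

-- B replaces A's linear first-match range scan by a bisect-right binary search over a sorted thresholds table (idiomatic; same result).


-- ===== PORT A =====
-- A's literal (lo, hi, label) table; float("inf") upper bound ported as `none`
-- (exact here: for an integer x, `x < inf` always holds, like the `none` branch below)
def pvRowsA : List (Int × Option Int × String) :=
  [(0, some 1048576, "lt_1mb"),
   (1048576, some 10485760, "1mb_10mb"),
   (10485760, some 104857600, "10mb_100mb"),
   (104857600, none, "gt_100mb")]

-- A's for-loop with early return: first row whose range contains x; fallback "lt_1mb"
def pvScanA (x : Int) : List (Int × Option Int × String) → String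
  | [] => "lt_1mb"
  | (lo, hi, label) :: rest =>
      if decide (lo ≤ x) && (match hi with | none => true | some h => decide (x < h)) then
        label
      else pvScanA x rest

def size_bucket_py (size_bytes : Int) : String := pvScanA size_bytes pvRowsA

-- ===== PORT B =====
def pvThresholds : List Int := [1048576, 10485760, 104857600]
def pvLabels : List String := ["lt_1mb", "1mb_10mb", "10mb_100mb", "gt_100mb"]

-- Source B's while-loop, with fuel (fuel 4 > len(_THRESHOLDS) suffices: each step shrinks hi-lo)
def pvBsLoop (x : Int) : Nat → Nat → Nat → Nat
  | 0, lo, _ => lo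
  | fuel + 1, lo, hi =>
      if lo < hi then
        let mid := (lo + hi) / 2
        if pvThresholds.getD mid 0 ≤ x then pvBsLoop x fuel (mid + 1) hi
        else pvBsLoop x fuel lo mid
      else lo

-- _LABELS[lo]: the loop keeps lo ≤ 3, so getD's default is never used
def size_bucket_py_alt (size_bytes : Int) : String :=
  pvLabels.getD (pvBsLoop size_bytes 4 0 3) "lt_1mb"

-- ===== PRECONDITION & SPEC =====
def Spec_size_bucket_py (size_bytes : Int) (out : String) : Prop := out = size_bucket_py_alt size_bytes
instance (size_bytes : Int) (out : String) : Decidable (Spec_size_bucket_py size_bytes out) := by unfold Spec_size_bucket_py; infer_instance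

-- ===== CLAIM (what is proved, stated in full; the proofs are below) =====
def Claim_equal_size_bucket_py : Prop := ∀ (size_bytes : Int), Dom_size_bucket_py size_bytes → Spec_size_bucket_py size_bytes (size_bucket_py size_bytes)

-- ===== LEMMAS AND PROOFS =====
-- the binary search fully unrolled: which index it returns for each region of x
theorem pv_bs_eval (x : Int) :
    pvBsLoop x 4 0 3 =
      if (10485760:Int) ≤ x then (if (104857600:Int) ≤ x then 3 else 2)
      else (if (1048576:Int) ≤ x then 1 else 0) := by
  have s0 : pvBsLoop x 4 0 3 =
      if (10485760:Int) ≤ x then pvBsLoop x 3 2 3 else pvBsLoop x 3 0 1 := rfl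
  have s1 : pvBsLoop x 3 2 3 = if (104857600:Int) ≤ x then 3 else 2 := rfl
  have s2 : pvBsLoop x 3 0 1 = if (1048576:Int) ≤ x then 1 else 0 := rfl
  rw [s0, s1, s2]

-- ===== VERDICT (by name: the statement is the Claim_ definition above) =====
theorem size_bucket_py_spec : Claim_equal_size_bucket_py := by
  intro x _
  unfold Spec_size_bucket_py size_bucket_py size_bucket_py_alt
  rw [pv_bs_eval]
  simp only [pvScanA, pvRowsA, pvLabels, Bool.and_eq_true, decide_eq_true_eq, and_true]
  split_ifs <;> first | rfl | omega
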